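-- pv_equiv track=rewrite | github.com/MTDahmer/Portfolio | hw6.py | isBase8
-- ===== SOURCE A (Python) =====
-- def isBase8(base8):
--     flagBase8 = True
--     if (base8.isdigit()):
--         newList = list(base8)
--         newList.sort()
--         newIndex = int(newList[-1])
--         while (flagBase8 == True):
--             if ( newIndex > 8):
--                 return False
--             else:
--                 flagBase8 = False
--                 return True
--     else:
--         return False
-- ===== SOURCE B (Python) =====
-- def isBase8(base8):
--     if not base8.isdigit():
--         return False
--     return int(max(base8)) <= 8
-- ===== Notes on version B (the rewrite author's own statement) =====
-- stated objective: simpler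
-- what changed: Replaced the sort-then-index-the-last-element and the dead while/flag machinery with a guard plus a single-pass max(base8) compared via int(...) <= 8.
import Mathlib
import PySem

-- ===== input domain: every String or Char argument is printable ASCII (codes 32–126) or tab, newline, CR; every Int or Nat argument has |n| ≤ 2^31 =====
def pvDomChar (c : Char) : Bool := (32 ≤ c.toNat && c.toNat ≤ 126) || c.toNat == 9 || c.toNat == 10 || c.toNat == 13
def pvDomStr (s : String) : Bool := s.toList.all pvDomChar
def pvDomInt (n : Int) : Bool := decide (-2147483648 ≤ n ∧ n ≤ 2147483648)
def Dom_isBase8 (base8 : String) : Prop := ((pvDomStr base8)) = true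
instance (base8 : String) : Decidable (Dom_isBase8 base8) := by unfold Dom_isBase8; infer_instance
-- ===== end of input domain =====

-- B replaces A's sort + last-element index + dead while/flag machinery by a guard and a single-pass max: simpler.


-- ===== PORT A =====
def isBase8 (base8 : String) : Bool :=
  if PySem.Str.strIsdigit base8 then
    match PySem.Int.ofChars?
        [PySem.List.pyGetD (PySem.List.sorted base8.toList (fun x => x) false) (-1) ' '] with
    | some newIndex => if newIndex > 8 then false else true
    | none => false   -- int() ValueError; unreachable: isdigit ⇒ the char int-converts
  else false

-- ===== PORT B =====
def isBase8_alt (base8 : String) : Bool :=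
  if PySem.Str.strIsdigit base8 then
    match PySem.List.max? base8.toList (fun x => x) with
    | some m =>
      match PySem.Int.ofChars? [m] with
      | some v => decide (v ≤ 8)
      | none => false   -- int() ValueError; unreachable: isdigit ⇒ the char int-converts
    | none => false     -- max() on empty; unreachable: isdigit ⇒ nonempty
  else false

-- ===== PRECONDITION & SPEC =====
def Spec_isBase8 (base8 : String) (out : Bool) : Prop := out = isBase8_alt base8
instance (base8 : String) (out : Bool) : Decidable (Spec_isBase8 base8 out) := by unfold Spec_isBase8; infer_instance

-- ===== CLAIM (what is proved, stated in full; the proofs are below) =====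
def Claim_equal_isBase8 : Prop := ∀ (base8 : String), Dom_isBase8 base8 → Spec_isBase8 base8 (isBase8 base8)

-- ===== LEMMAS AND PROOFS =====

-- isdigit of the empty string is False
lemma strIsdigit_ne_nil (l : List Char) (h : PySem.Chars.strIsdigit l = true) : l ≠ [] := by
  intro he; subst he; simp [PySem.Chars.strIsdigit] at h

-- the last element of sorted(l) is the value max(l) returns
lemma last_sorted_eq_max (l : List Char) (h : l ≠ [])
    (m : Char) (hm : PySem.List.max? l (fun x => x) = some m) :
    PySem.List.pyGetD (PySem.List.sorted l (fun x => x) false) (-1) ' ' = m := by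
  have hsne : PySem.List.sorted l (fun x => x) false ≠ [] := by
    simp [PySem.List.sorted_eq_nil_iff, h]
  rw [PySem.List.pyGetD_neg_one _ _ hsne]
  have hc_mem : (PySem.List.sorted l (fun x => x) false).getLast hsne ∈ l := by
    rw [← PySem.List.mem_sorted l (fun x => x) false]
    exact List.getLast_mem hsne
  have hle : (PySem.List.sorted l (fun x => x) false).getLast hsne ≤ m :=
    PySem.List.max?_isMax hm _ hc_mem
  have hm_mem : m ∈ PySem.List.sorted l (fun x => x) false := by
    rw [PySem.List.mem_sorted]; exact PySem.List.max?_mem hm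
  obtain ⟨p, hp, hpe⟩ := List.mem_iff_getElem.mp hm_mem
  have hge : m ≤ (PySem.List.sorted l (fun x => x) false).getLast hsne := by
    rw [List.getLast_eq_getElem]
    have := PySem.List.key_sorted_getElem_mono l (fun x => x)
      (p := p) (q := (PySem.List.sorted l (fun x => x) false).length - 1)
      (by omega) (by omega)
    simpa [hpe] using this
  exact le_antisymm hle hge

theorem isBase8_spec : Claim_equal_isBase8 := by
  intro s _
  unfold Spec_isBase8 isBase8 isBase8_alt
  by_cases hd : PySem.Str.strIsdigit s = true
  · simp only [hd, if_true]
    have hne : s.toList ≠ [] := by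
      apply strIsdigit_ne_nil
      simpa [PySem.Str.strIsdigit] using hd
    obtain ⟨m, hm⟩ : ∃ m, PySem.List.max? s.toList (fun x => x) = some m := by
      cases hmx : PySem.List.max? s.toList (fun x => x) with
      | none => exact absurd ((PySem.List.max?_eq_none_iff _ _).mp hmx) hne
      | some m => exact ⟨m, rfl⟩
    rw [hm, last_sorted_eq_max s.toList hne m hm]
    cases hX : PySem.Int.ofChars? [m] with
    | none => simp [hX]
    | some n =>
      simp only [hX]
      by_cases hn : n > 8
      · simp [hn, show ¬ n ≤ 8 by omega]
      · simp [hn, show n ≤ 8 by omega]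
  · have hf : PySem.Chars.strIsdigit s.toList = false := by
      simpa [PySem.Str.strIsdigit] using hd
    simp [hf]
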